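-- pv_equiv track=rewrite | github.com/Yash9988/self-learn | leetcode/2054.py | maxTwoEvents_op
-- ===== SOURCE A (Python) =====
-- from bisect import bisect_right
--
-- def maxTwoEvents_op(events: list[list[int]]) -> int:
--     max_weights = [0]                                               # List to track max-start values
--     max_weight_ends = [-1]                                          # List to track end-times for max-start values
--
--     events.sort(key=lambda x: x[1])                                 # Sort the event list by end-times
--
--     max_two = 0                                                     # Counter to track the max-sum of 2 events
--
--     for start, end, weight in events:                               # Iterate through the events
--         index = bisect_right(max_weight_ends, start - 1) - 1        # Compute the index for end-time in max-val list
--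
--         # Check if sum b/w curr-wt and idx-wt is greater than the counter value
--         if weight + max_weights[index] > max_two:
--             max_two = weight + max_weights[index]                   # Update the counter value with the max-sum
--
--         # Check if curr-wt is greater than last max-start weight
--         if weight > max_weights[-1]:
--             max_weights.append(weight)                              # Append the curr-wt to max-start list
--             max_weight_ends.append(end)                             # Append the corresponding end-time to max-end list
--
--     return max_two                                                  # Return the result
-- ===== SOURCE B (Python) =====
-- def maxTwoEvents_op(events: list[list[int]]) -> int:
--     events.sort(key=lambda x: x[1])             # same in-place sort by end-time as A
--     best = 0
--     seen = []                                   # events already passed, in end order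
--     for start, end, weight in events:
--         prev = 0                                # best weight among earlier-ending, non-overlapping events
--         for _, u, v in seen:
--             if u < start:
--                 if v > prev:
--                     prev = v
--         if weight + prev > best:
--             best = weight + prev
--         seen.append((start, end, weight))
--     return best
-- ===== Notes on version B (the rewrite author's own statement) =====
-- stated objective: simpler
-- what changed: Replaces A's incremental monotonic prefix-max lists with bisect lookups by a plain quadratic scan: for each event (in end order) it scans the already-passed events directly for the best earlier-ending non-overlapping weight; no auxiliary arrays, no binary search, no negative-index arithmetic.
-- intended difference: On lists where a positive-weight event with negative start has an overlapping positive-weight partner ending no later whose weight dominates every earlier-ending event and whose pair sum exceeds every single weight, A's 'bisect_right(...)-1' index underflows to -1 and max_weights[-1] can add the weight of that OVERLAPPING event (A returns the inflated sum); B returns the true maximum over single events and non-overlapping pairs, which is the intended value. — e.g. on maxTwoEvents_op([[-1, 5, 3], [0, 4, 2]]): A returns 5, B returns 3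
import Mathlib
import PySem

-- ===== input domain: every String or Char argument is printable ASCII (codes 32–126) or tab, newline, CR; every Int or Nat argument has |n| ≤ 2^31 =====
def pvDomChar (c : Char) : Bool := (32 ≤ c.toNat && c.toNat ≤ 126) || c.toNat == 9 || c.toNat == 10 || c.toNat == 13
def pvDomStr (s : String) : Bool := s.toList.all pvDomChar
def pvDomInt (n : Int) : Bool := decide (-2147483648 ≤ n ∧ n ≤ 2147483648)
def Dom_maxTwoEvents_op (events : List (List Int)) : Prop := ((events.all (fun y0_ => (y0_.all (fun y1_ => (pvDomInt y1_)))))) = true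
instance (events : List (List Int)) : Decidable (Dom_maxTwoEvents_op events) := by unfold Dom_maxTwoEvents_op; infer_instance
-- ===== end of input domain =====

-- B replaces A's monotonic prefix-max lists + bisect by a plain quadratic scan of the already-passed
-- events (objective: simpler); both Pythons sort `events` in place by end time, and the equivalence
-- proved here is about the RETURN value only (the in-place sort is the same on both sides).

-- the three fields of an event record [start, end, weight], as both Pythons unpack them
def evS (t : List Int) : Int := t.getD 0 0
def evE (t : List Int) : Int := t.getD 1 0
def evW (t : List Int) : Int := t.getD 2 0

-- ===== PORT A =====
def maxTwoEvents_op (events : List (List Int)) : Int :=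
  let evs := PySem.List.sorted events (fun x => x.getD 1 0)
  (evs.foldl
    (fun (st : List Int × List Int × Int) ev =>
      let maxWeights := st.1
      let maxWeightEnds := st.2.1
      let maxTwo := st.2.2
      let start := evS ev
      let endt := evE ev
      let weight := evW ev
      let index : Int := (PySem.List.bisectRight maxWeightEnds (start - 1) : Int) - 1
      let v := PySem.List.pyGetD maxWeights index 0
      let maxTwo' := if weight + v > maxTwo then weight + v else maxTwo
      if weight > PySem.List.pyGetD maxWeights (-1) 0 then
        (maxWeights ++ [weight], maxWeightEnds ++ [endt], maxTwo')
      else (maxWeights, maxWeightEnds, maxTwo'))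
    ([0], [-1], 0)).2.2

-- ===== PORT B =====
def maxTwoEvents_op_alt (events : List (List Int)) : Int :=
  let evs := PySem.List.sorted events (fun x => x.getD 1 0)
  (evs.foldl
    (fun (st : Int × List (Int × Int × Int)) ev =>
      let best := st.1
      let seen := st.2
      let start := evS ev
      let endt := evE ev
      let weight := evW ev
      let prev := seen.foldl
        (fun prev t => if t.2.1 < start then (if t.2.2 > prev then t.2.2 else prev) else prev) 0
      let best' := if weight + prev > best then weight + prev else best
      (best', seen ++ [(start, endt, weight)]))
    (0, [])).1

-- ===== PRECONDITION & SPEC =====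
-- Pre_ excludes exactly the inputs on which the Python A raises: an event list with fewer than 2
-- entries makes the sort key raise IndexError, and any event of length ≠ 3 makes the tuple
-- unpacking in the for-loop raise ValueError.
def Pre_maxTwoEvents_op (events : List (List Int)) : Prop := ∀ e ∈ events, e.length = 3
instance (events : List (List Int)) : Decidable (Pre_maxTwoEvents_op events) := by
  unfold Pre_maxTwoEvents_op; infer_instance
def pvWitness_maxTwoEvents_op : List (List Int) := [[1, 3, 4], [4, 6, 2], [2, 5, 1]]

-- On lists where a positive-weight event i with negative start has an OVERLAPPING positive-weight
-- partner j ending no later whose weight dominates every earlier-ending event and whose pair sum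
-- exceeds every single weight, A's `bisect_right(...) - 1` index underflows to -1 and
-- `max_weights[-1]` can add the weight of that overlapping partner (A returns the inflated sum);
-- B returns the true maximum over single events and non-overlapping pairs, the intended value.
def D_maxTwoEvents_op (events : List (List Int)) : Prop :=
  ∃ i ∈ events, ∃ j ∈ events,
    (i = j → 2 ≤ events.count i) ∧
    evS i < 0 ∧ 0 < evW i ∧ 0 < evW j ∧ evS i ≤ evE j ∧ evE j ≤ evE i ∧
    ∀ k ∈ events, (evE k < evE i → evW k ≤ evW j) ∧ evW k < evW i + evW j
instance (events : List (List Int)) : Decidable (D_maxTwoEvents_op events) := by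
  unfold D_maxTwoEvents_op; infer_instance

def Spec_maxTwoEvents_op (events : List (List Int)) (out : Int) : Prop :=
  ¬ D_maxTwoEvents_op events → out = maxTwoEvents_op_alt events
instance (events : List (List Int)) (out : Int) : Decidable (Spec_maxTwoEvents_op events out) := by
  unfold Spec_maxTwoEvents_op; infer_instance

def pvDiffWitness_maxTwoEvents_op : List (List Int) := [[-1, 5, 3], [0, 4, 2]]
def pvDiffWitnessOut_maxTwoEvents_op : Int × Int := (5, 3)

-- ===== CLAIM (what is proved, stated in full; the proofs are below) =====
def Claim_unchanged_maxTwoEvents_op : Prop := ∀ (events : List (List Int)), Dom_maxTwoEvents_op events → Pre_maxTwoEvents_op events → Spec_maxTwoEvents_op events (maxTwoEvents_op events)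
def Claim_changed_maxTwoEvents_op : Prop := Dom_maxTwoEvents_op (pvDiffWitness_maxTwoEvents_op) ∧ Pre_maxTwoEvents_op (pvDiffWitness_maxTwoEvents_op) ∧ D_maxTwoEvents_op (pvDiffWitness_maxTwoEvents_op) ∧ maxTwoEvents_op (pvDiffWitness_maxTwoEvents_op) = pvDiffWitnessOut_maxTwoEvents_op.1 ∧ maxTwoEvents_op_alt (pvDiffWitness_maxTwoEvents_op) = pvDiffWitnessOut_maxTwoEvents_op.2 ∧ pvDiffWitnessOut_maxTwoEvents_op.1 ≠ pvDiffWitnessOut_maxTwoEvents_op.2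

-- ===== LEMMAS AND PROOFS =====

def pmW (x : Int) : List (List Int) → Int
  | [] => 0
  | t :: p => if evE t ≤ x then max (evW t) (pmW x p) else pmW x p
def rmW : List (List Int) → Int
  | [] => 0
  | t :: p => max (evW t) (rmW p)

theorem pmW_nonneg (x : Int) (p : List (List Int)) : 0 ≤ pmW x p := by
  induction p with
  | nil => simp [pmW]
  | cons t p ih => simp only [pmW]; split_ifs <;> omega

theorem rmW_nonneg (p : List (List Int)) : 0 ≤ rmW p := by
  induction p with
  | nil => simp [rmW]
  | cons t p ih => simp only [rmW]; omega

theorem pmW_le_rmW (x : Int) (p : List (List Int)) : pmW x p ≤ rmW p := by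
  induction p with
  | nil => simp [pmW, rmW]
  | cons t p ih => simp only [pmW, rmW]; split_ifs <;> omega

theorem pmW_append (x : Int) (p q : List (List Int)) :
    pmW x (p ++ q) = max (pmW x p) (pmW x q) := by
  induction p with
  | nil => have := pmW_nonneg x q; simp [pmW]; omega
  | cons t p ih => simp only [List.cons_append, pmW, ih]; split_ifs <;> omega

theorem rmW_append (p q : List (List Int)) : rmW (p ++ q) = max (rmW p) (rmW q) := by
  induction p with
  | nil => have := rmW_nonneg q; simp [rmW]; omega
  | cons t p ih => simp only [List.cons_append, rmW, ih]; omega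

theorem rmW_ge_mem {p : List (List Int)} {t : List Int} (h : t ∈ p) : evW t ≤ rmW p := by
  induction p with
  | nil => simp at h
  | cons u p ih =>
    rcases List.mem_cons.1 h with h | h
    · subst h; simp only [rmW]; omega
    · have := ih h; simp only [rmW]; omega

theorem pmW_ge_mem {p : List (List Int)} {t : List Int} {x : Int} (h : t ∈ p)
    (he : evE t ≤ x) : evW t ≤ pmW x p := by
  induction p with
  | nil => simp at h
  | cons u p ih =>
    rcases List.mem_cons.1 h with h | h
    · subst h; simp only [pmW, if_pos he]; omega
    · have := ih h; simp only [pmW]; split_ifs <;> omega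

theorem rmW_exists {p : List (List Int)} (h : 0 < rmW p) :
    ∃ p1 t p2, p = p1 ++ t :: p2 ∧ evW t = rmW p := by
  induction p with
  | nil => simp [rmW] at h
  | cons u p ih =>
    by_cases hc : rmW p ≤ evW u
    · exact ⟨[], u, p, rfl, by simp only [rmW]; omega⟩
    · have hp : 0 < rmW p := by simp only [rmW] at h; omega
      obtain ⟨p1, t, p2, heq, hw⟩ := ih hp
      exact ⟨u :: p1, t, p2, by simp [heq], by simp only [rmW]; omega⟩

theorem pmW_eq_rmW_of_all {p : List (List Int)} {x : Int} (h : ∀ t ∈ p, evE t ≤ x) :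
    pmW x p = rmW p := by
  induction p with
  | nil => simp [pmW, rmW]
  | cons u p ih =>
    simp only [pmW, rmW, if_pos (h u (List.mem_cons_self ..))]
    rw [ih (fun t ht => h t (List.mem_cons_of_mem _ ht))]

theorem countP_le_of_sorted (x : Int) : ∀ (b : List Int), b.Pairwise (· ≤ ·) →
    ∀ (j : Nat) (hj : j < b.length), x < b[j] →
    b.countP (fun y => decide (y ≤ x)) ≤ j := by
  intro b hb
  induction b with
  | nil => intro j hj; simp at hj
  | cons u b ih =>
    intro j hj hx
    rcases List.pairwise_cons.1 hb with ⟨hu, hb'⟩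
    match j with
    | 0 =>
      simp only [List.getElem_cons_zero] at hx
      have h0 : b.countP (fun y => decide (y ≤ x)) = 0 := by
        refine List.countP_eq_zero.2 ?_
        intro a ha
        have := hu a ha
        simp only [decide_eq_true_eq]
        omega
      simp [List.countP_cons, h0]
      omega
    | j + 1 =>
      simp only [List.getElem_cons_succ] at hx
      have := ih hb' j (by simpa using hj) hx
      simp only [List.countP_cons]
      split_ifs <;> omega

theorem le_countP_of_sorted (x : Int) : ∀ (b : List Int), b.Pairwise (· ≤ ·) →
    ∀ (j : Nat) (hj : j < b.length), b[j] ≤ x →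
    j + 1 ≤ b.countP (fun y => decide (y ≤ x)) := by
  intro b hb
  induction b with
  | nil => intro j hj; simp at hj
  | cons u b ih =>
    intro j hj hx
    rcases List.pairwise_cons.1 hb with ⟨hu, hb'⟩
    match j with
    | 0 =>
      simp only [List.getElem_cons_zero] at hx
      simp only [List.countP_cons, decide_eq_true_eq]
      have := List.countP_pos_iff (p := fun y => decide (y ≤ x)) (l := b)
      split_ifs <;> omega
    | j + 1 =>
      simp only [List.getElem_cons_succ] at hx
      have := ih hb' j (by simpa using hj) hx
      have hjb : j < b.length := by simpa using hj
      have hub : u ≤ b[j] := hu _ (List.getElem_mem _)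
      simp only [List.countP_cons, decide_eq_true_eq]
      split_ifs <;> omega

theorem bisect_loop (b : List Int) (x : Int) (hb : b.Pairwise (· ≤ ·)) :
    ∀ (fuel lo hi : Nat), lo ≤ hi → hi ≤ b.length + 1 → hi - lo ≤ fuel →
    lo ≤ (if b.countP (fun y => decide (y ≤ x)) = 0 then (if x < -1 then 0 else 1)
          else b.countP (fun y => decide (y ≤ x)) + 1) →
    (if b.countP (fun y => decide (y ≤ x)) = 0 then (if x < -1 then 0 else 1)
          else b.countP (fun y => decide (y ≤ x)) + 1) ≤ hi →
    PySem.List.bisectRightLoop ((-1 : Int) :: b) x fuel lo hi =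
      (if b.countP (fun y => decide (y ≤ x)) = 0 then (if x < -1 then 0 else 1)
       else b.countP (fun y => decide (y ≤ x)) + 1) := by
  set k := b.countP (fun y => decide (y ≤ x)) with hk
  set T := (if k = 0 then (if x < -1 then 0 else 1) else k + 1) with hT
  intro fuel
  induction fuel with
  | zero =>
    intro lo hi h1 h2 h3 h4 h5
    rw [PySem.List.bisectRightLoop]
    omega
  | succ fuel ih =>
    intro lo hi h1 h2 h3 h4 h5
    rw [PySem.List.bisectRightLoop]
    by_cases hlt : lo < hi
    · rw [if_pos hlt]
      have hmid : (lo + hi) / 2 < ((-1 : Int) :: b).length := by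
        simp only [List.length_cons]; omega
      rw [List.getElem?_eq_getElem hmid]
      simp only []
      by_cases hcmp : x < ((-1 : Int) :: b)[(lo + hi) / 2]
      · rw [if_pos hcmp]
        refine ih lo ((lo + hi) / 2) (by omega) (by omega) (by omega) h4 ?_
        -- T ≤ mid
        by_cases hm0 : (lo + hi) / 2 = 0
        · -- mid = 0: lo = 0, hi = 1
          simp only [List.getElem_cons, hm0, dif_pos] at hcmp
          have hhi : hi = 1 := by omega
          rw [hhi] at h5
          rw [hm0]
          simp only [hT] at h5 ⊢
          split_ifs at h5 ⊢ <;> omega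
        · -- mid ≥ 1
          simp only [List.getElem_cons, hm0, dif_neg, not_false_iff] at hcmp
          have hkle := countP_le_of_sorted x b hb ((lo + hi) / 2 - 1) (by omega) hcmp
          rw [← hk] at hkle
          simp only [hT]
          split_ifs <;> omega
      · rw [if_neg hcmp]
        refine ih ((lo + hi) / 2 + 1) hi (by omega) h2 (by omega) ?_ h5
        -- mid + 1 ≤ T
        by_cases hm0 : (lo + hi) / 2 = 0
        · simp only [List.getElem_cons, hm0, dif_pos, not_lt] at hcmp
          rw [hm0]
          simp only [hT] at h5 ⊢
          split_ifs at h5 ⊢ <;> omega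
        · simp only [List.getElem_cons, hm0, dif_neg, not_false_iff, not_lt] at hcmp
          have := le_countP_of_sorted x b hb ((lo + hi) / 2 - 1) (by omega) hcmp
          rw [← hk] at this
          simp only [hT]
          split_ifs <;> omega
    · rw [if_neg hlt]
      omega

theorem bisect_char (b : List Int) (x : Int) (hb : b.Pairwise (· ≤ ·)) :
    PySem.List.bisectRight ((-1 : Int) :: b) x =
      (if b.countP (fun y => decide (y ≤ x)) = 0 then (if x < -1 then 0 else 1)
       else b.countP (fun y => decide (y ≤ x)) + 1) := by
  have hlen := List.countP_le_length (p := fun y => decide (y ≤ x)) (l := b)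
  refine bisect_loop b x hb _ 0 _ (by simp) (by simp) (by simp) (by omega) ?_
  simp only [List.length_cons]
  split_ifs <;> omega

-- A's per-event pairing value: the prefix max over ends ≤ start-1, except that with a negative
-- start and no positive-weight non-overlapping predecessor the bisect index underflows to the
-- running max over the whole prefix.
def tVal (p : List (List Int)) (s : Int) : Int :=
  if -1 ≤ s - 1 ∨ 0 < pmW (s - 1) p then pmW (s - 1) p else rmW p

def fA (p : List (List Int)) (t : List Int) : Int := evW t + tVal p (evS t)
def fB (p : List (List Int)) (t : List Int) : Int := evW t + pmW (evS t - 1) p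

-- running maximum of per-(prefix, element) terms, as both ports' outer loops compute it
def maxRun (f : List (List Int) → List Int → Int) :
    List (List Int) → List (List Int) → Int → Int
  | _, [], acc => acc
  | p, t :: r, acc => maxRun f (p ++ [t]) r (max acc (f p t))

-- the loop bodies of the two ports, named so the fold lemmas can speak about them
def stepA (st : List Int × List Int × Int) (ev : List Int) : List Int × List Int × Int :=
  let maxWeights := st.1
  let maxWeightEnds := st.2.1
  let maxTwo := st.2.2
  let start := evS ev
  let endt := evE ev
  let weight := evW ev
  let index : Int := (PySem.List.bisectRight maxWeightEnds (start - 1) : Int) - 1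
  let v := PySem.List.pyGetD maxWeights index 0
  let maxTwo' := if weight + v > maxTwo then weight + v else maxTwo
  if weight > PySem.List.pyGetD maxWeights (-1) 0 then
    (maxWeights ++ [weight], maxWeightEnds ++ [endt], maxTwo')
  else (maxWeights, maxWeightEnds, maxTwo')

def stepB (st : Int × List (Int × Int × Int)) (ev : List Int) : Int × List (Int × Int × Int) :=
  let best := st.1
  let seen := st.2
  let start := evS ev
  let endt := evE ev
  let weight := evW ev
  let prev := seen.foldl
    (fun prev t => if t.2.1 < start then (if t.2.2 > prev then t.2.2 else prev) else prev) 0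
  let best' := if weight + prev > best then weight + prev else best
  (best', seen ++ [(start, endt, weight)])

theorem portA_eq (events : List (List Int)) :
    maxTwoEvents_op events =
      ((PySem.List.sorted events (fun x => x.getD 1 0)).foldl stepA ([0], [-1], 0)).2.2 := rfl

theorem portB_eq (events : List (List Int)) :
    maxTwoEvents_op_alt events =
      ((PySem.List.sorted events (fun x => x.getD 1 0)).foldl stepB (0, [])).1 := rfl

-- the invariant tying A's (max_weights, max_weight_ends) to the processed prefix p
def AInv (p : List (List Int)) (mw me : List Int) : Prop :=
  ∃ ws bs, mw = 0 :: ws ∧ me = -1 :: bs ∧ ws.length = bs.length ∧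
    bs.Pairwise (· ≤ ·) ∧
    (mw.getLast? = some (rmW p)) ∧
    (∀ x : Int, (0 :: ws).getD (bs.countP (fun y => decide (y ≤ x))) 0 = pmW x p) ∧
    (∀ y ∈ bs, ∃ t ∈ p, y = evE t ∧ 0 < evW t)

theorem rmW_snoc (p : List (List Int)) (t : List Int) :
    rmW (p ++ [t]) = max (rmW p) (evW t) := by
  rw [rmW_append]
  have := rmW_nonneg p
  simp only [rmW]
  omega

theorem pmW_snoc (x : Int) (p : List (List Int)) (t : List Int) :
    pmW x (p ++ [t]) = if evE t ≤ x then max (pmW x p) (evW t) else pmW x p := by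
  rw [pmW_append]
  have := pmW_nonneg x p
  simp only [pmW]
  split_ifs <;> omega

theorem getD_concat_length (L : List Int) (w : Int) : (L ++ [w]).getD L.length 0 = w := by
  simp [List.getD_eq_getElem?_getD, List.getElem?_concat_length]

theorem getD_concat_lt (L : List Int) (w : Int) (n : Nat) (hn : n < L.length) :
    (L ++ [w]).getD n 0 = L.getD n 0 := by
  simp [List.getD_eq_getElem?_getD, List.getElem?_append_left hn]

theorem inv_last {p : List (List Int)} {mw me : List Int} (h : AInv p mw me) :
    PySem.List.pyGetD mw (-1) 0 = rmW p := by
  obtain ⟨ws, bs, hmw, hme, hlen, hpair, hlast, hI4, hI6⟩ := h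
  subst hmw
  rw [PySem.List.pyGetD_neg_one (0 :: ws) 0 (by simp)]
  have h2 := List.getLast?_eq_some_getLast (l := 0 :: ws) (by simp)
  rw [h2] at hlast
  exact Option.some.inj hlast

theorem inv_value {p : List (List Int)} {mw me : List Int} (h : AInv p mw me) (s : Int) :
    PySem.List.pyGetD mw ((PySem.List.bisectRight me (s - 1) : Int) - 1) 0 = tVal p s := by
  have hlast' := inv_last h
  obtain ⟨ws, bs, hmw, hme, hlen, hpair, hlast, hI4, hI6⟩ := h
  subst hmw hme
  rw [bisect_char bs (s - 1) hpair]
  by_cases hk : bs.countP (fun y => decide (y ≤ s - 1)) = 0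
  · have hpm : pmW (s - 1) p = 0 := by
      have := hI4 (s - 1)
      rw [hk] at this
      simpa using this.symm
    by_cases hx : s - 1 < -1
    · rw [if_pos hk, if_pos hx]
      have : ((0 : Nat) : Int) - 1 = -1 := by norm_num
      rw [this, hlast']
      rw [tVal, if_neg (by omega)]
    · rw [if_pos hk, if_neg hx]
      have : ((1 : Nat) : Int) - 1 = 0 := by norm_num
      rw [this, PySem.List.pyGetD_zero]
      rw [tVal, if_pos (Or.inl (by omega))]
      simp [hpm]
  · rw [if_neg hk]
    set k := bs.countP (fun y => decide (y ≤ s - 1)) with hkdef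
    have hcast : ((k + 1 : Nat) : Int) - 1 = (k : Int) := by push_cast; ring
    rw [hcast, PySem.List.pyGetD_natCast]
    have hpos : 0 < pmW (s - 1) p := by
      obtain ⟨y, hy, hyx⟩ := List.countP_pos_iff.1 (Nat.pos_of_ne_zero hk)
      obtain ⟨t, ht, hye, hw⟩ := hI6 y hy
      have hle : evE t ≤ s - 1 := by rw [← hye]; simpa using hyx
      have := pmW_ge_mem ht hle
      omega
    rw [tVal, if_pos (Or.inr hpos)]
    exact hI4 (s - 1)

theorem inv_step {p : List (List Int)} {mw me : List Int} (h : AInv p mw me) (t : List Int)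
    (hord : ∀ u ∈ p, evE u ≤ evE t) :
    AInv (p ++ [t])
      (if evW t > PySem.List.pyGetD mw (-1) 0 then mw ++ [evW t] else mw)
      (if evW t > PySem.List.pyGetD mw (-1) 0 then me ++ [evE t] else me) := by
  have hlast' := inv_last h
  obtain ⟨ws, bs, hmw, hme, hlen, hpair, hlast, hI4, hI6⟩ := h
  subst hmw hme
  rw [hlast']
  have hrm0 := rmW_nonneg p
  by_cases hw : evW t > rmW p
  · rw [if_pos hw, if_pos hw]
    refine ⟨ws ++ [evW t], bs ++ [evE t], by simp, by simp, by simp [hlen], ?_, ?_, ?_, ?_⟩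
    · -- pairwise
      rw [List.pairwise_append]
      refine ⟨hpair, by simp, ?_⟩
      intro y hy z hz
      obtain ⟨u, hu, hye, _⟩ := hI6 y hy
      simp only [List.mem_singleton] at hz
      subst hz
      rw [hye]
      exact hord u hu
    · -- getLast?
      have : (0 :: ws ++ [evW t]).getLast? = some (evW t) := by
        rw [show (0 :: ws ++ [evW t]) = (0 :: ws) ++ [evW t] by simp]
        exact List.getLast?_concat
      rw [this, rmW_snoc]
      congr 1
      omega
    · -- I4
      intro x
      have hcnt : (bs ++ [evE t]).countP (fun y => decide (y ≤ x)) =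
          bs.countP (fun y => decide (y ≤ x)) + (if evE t ≤ x then 1 else 0) := by
        rw [List.countP_append]
        simp [List.countP_cons]
      rw [hcnt, pmW_snoc]
      by_cases hex : evE t ≤ x
      · rw [if_pos hex, if_pos hex]
        -- all of bs is ≤ x, so the count is full
        have hfull : bs.countP (fun y => decide (y ≤ x)) = bs.length := by
          apply List.countP_eq_length.2
          intro y hy
          obtain ⟨u, hu, hye, _⟩ := hI6 y hy
          simp only [decide_eq_true_eq]
          rw [hye]
          exact le_trans (hord u hu) hex
        have hpmle := pmW_le_rmW x p
        rw [hfull, ← List.cons_append,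
            show bs.length + 1 = (0 :: ws).length by simp [hlen],
            getD_concat_length]
        omega
      · rw [if_neg hex, if_neg hex]
        have hcl := List.countP_le_length (p := fun y => decide (y ≤ x)) (l := bs)
        rw [Nat.add_zero, ← List.cons_append,
            getD_concat_lt _ _ _ (by simp [hlen]; omega)]
        exact hI4 x
    · -- I6
      intro y hy
      rcases List.mem_append.1 hy with hy | hy
      · obtain ⟨u, hu, h1, h2⟩ := hI6 y hy
        exact ⟨u, List.mem_append_left _ hu, h1, h2⟩
      · simp only [List.mem_singleton] at hy
        subst hy
        exact ⟨t, List.mem_append_right _ (by simp), rfl, by omega⟩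
  · rw [if_neg hw, if_neg hw]
    refine ⟨ws, bs, rfl, rfl, hlen, hpair, ?_, ?_, ?_⟩
    · rw [hlast, rmW_snoc]
      congr 2
      omega
    · intro x
      rw [pmW_snoc]
      by_cases hex : evE t ≤ x
      · rw [if_pos hex]
        have hall : ∀ u ∈ p, evE u ≤ x := fun u hu => le_trans (hord u hu) hex
        have := pmW_eq_rmW_of_all hall
        rw [hI4 x, this]
        omega
      · rw [if_neg hex]
        exact hI4 x
    · intro y hy
      obtain ⟨u, hu, h1, h2⟩ := hI6 y hy
      exact ⟨u, List.mem_append_left _ hu, h1, h2⟩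

theorem maxRun_acc_le (f : List (List Int) → List Int → Int) (r : List (List Int)) :
    ∀ (p : List (List Int)) (acc : Int), acc ≤ maxRun f p r acc := by
  induction r with
  | nil => intro p acc; simp [maxRun]
  | cons t r ih =>
    intro p acc
    simp only [maxRun]
    exact le_trans (le_max_left _ _) (ih _ _)

theorem maxRun_ge_term (f : List (List Int) → List Int → Int) {q1 : List (List Int)} :
    ∀ (p r q2 : List (List Int)) (t : List Int), r = q1 ++ t :: q2 →
    ∀ acc : Int, f (p ++ q1) t ≤ maxRun f p r acc := by
  induction q1 with
  | nil =>
    intro p r q2 t hr acc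
    subst hr
    simp only [List.nil_append, List.append_nil, maxRun]
    exact le_trans (le_max_right _ _) (maxRun_acc_le _ _ _ _)
  | cons u q1 ih =>
    intro p r q2 t hr acc
    subst hr
    simp only [List.cons_append, maxRun]
    have := ih (p ++ [u]) (q1 ++ t :: q2) q2 t rfl (max acc (f p u))
    rwa [show (p ++ [u]) ++ q1 = p ++ u :: q1 by simp] at this

theorem maxRun_le (f : List (List Int) → List Int → Int) (r : List (List Int)) :
    ∀ (p : List (List Int)) (acc C : Int),
    (∀ q1 t q2, r = q1 ++ t :: q2 → f (p ++ q1) t ≤ C) → acc ≤ C →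
    maxRun f p r acc ≤ C := by
  induction r with
  | nil => intro p acc C _ hacc; exact hacc
  | cons t r ih =>
    intro p acc C h hacc
    simp only [maxRun]
    refine ih (p ++ [t]) _ C ?_ ?_
    · intro q1 u q2 hq
      have := h (t :: q1) u q2 (by rw [hq]; simp)
      rwa [show p ++ t :: q1 = (p ++ [t]) ++ q1 by simp] at this
    · have := h [] t r rfl
      simp only [List.append_nil] at this
      exact max_le hacc this

theorem foldA_eq (rest : List (List Int)) : ∀ (p : List (List Int)) (mw me : List Int) (acc : Int),
    AInv p mw me →
    (∀ u ∈ p, ∀ t ∈ rest, evE u ≤ evE t) →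
    rest.Pairwise (fun a b => evE a ≤ evE b) →
    (rest.foldl stepA (mw, me, acc)).2.2 = maxRun fA p rest acc := by
  induction rest with
  | nil => intro p mw me acc _ _ _; rfl
  | cons t r ih =>
    intro p mw me acc hinv hord hpair
    rcases List.pairwise_cons.1 hpair with ⟨hhead, htail⟩
    have hv := inv_value hinv (evS t)
    have hstep : stepA (mw, me, acc) t =
        (if evW t > PySem.List.pyGetD mw (-1) 0 then mw ++ [evW t] else mw,
         if evW t > PySem.List.pyGetD mw (-1) 0 then me ++ [evE t] else me,
         max acc (fA p t)) := by
      simp only [stepA, fA]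
      rw [hv]
      split_ifs with h1 h2 h2 <;> simp <;> omega
    rw [List.foldl_cons, hstep]
    have hord' : ∀ u ∈ p ++ [t], ∀ v ∈ r, evE u ≤ evE v := by
      intro u hu v hvr
      rcases List.mem_append.1 hu with hu | hu
      · exact hord u hu v (List.mem_cons_of_mem _ hvr)
      · simp only [List.mem_singleton] at hu
        subst hu
        exact hhead v hvr
    have hordt : ∀ u ∈ p, evE u ≤ evE t := fun u hu => hord u hu t (List.mem_cons_self ..)
    rw [ih (p ++ [t]) _ _ _ (inv_step hinv t hordt) hord' htail]
    rfl

theorem innerB (s : Int) (p : List (List Int)) : ∀ (a : Int), 0 ≤ a →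
    (p.map (fun t => (evS t, evE t, evW t))).foldl
      (fun prev t => if t.2.1 < s then (if t.2.2 > prev then t.2.2 else prev) else prev) a =
      max a (pmW (s - 1) p) := by
  induction p with
  | nil =>
    intro a ha
    simp only [List.map_nil, List.foldl_nil, pmW]
    omega
  | cons t p ih =>
    intro a ha
    simp only [List.map_cons, List.foldl_cons]
    have hstep : 0 ≤ (if evE t < s then (if evW t > a then evW t else a) else a) := by
      split_ifs <;> omega
    rw [ih _ hstep]
    simp only [pmW]
    split_ifs <;> omega

theorem foldB_eq (rest : List (List Int)) : ∀ (p : List (List Int)) (acc : Int),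
    (rest.foldl stepB (acc, p.map (fun t => (evS t, evE t, evW t)))).1 =
      maxRun fB p rest acc := by
  induction rest with
  | nil => intro p acc; rfl
  | cons t r ih =>
    intro p acc
    have hstep : stepB (acc, p.map (fun t => (evS t, evE t, evW t))) t =
        (max acc (fB p t), (p ++ [t]).map (fun t => (evS t, evE t, evW t))) := by
      simp only [stepB, fB]
      rw [innerB (evS t) p 0 le_rfl]
      have := pmW_nonneg (evS t - 1) p
      rw [max_eq_right this]
      refine congrArg₂ Prod.mk ?_ (by simp)
      split_ifs <;> omega
    rw [List.foldl_cons, hstep, ih (p ++ [t]) (max acc (fB p t))]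
    rfl

theorem D_of_perm {X Y : List (List Int)} (hp : X.Perm Y) (hd : D_maxTwoEvents_op X) :
    D_maxTwoEvents_op Y := by
  obtain ⟨i, h1, j, h2, hc, c1, c2, c3, c4, c5, call⟩ := hd
  refine ⟨i, hp.subset h1, j, hp.subset h2, ?_, c1, c2, c3, c4, c5, ?_⟩
  · intro he
    rw [← hp.count_eq]
    exact hc he
  · intro k hk
    exact call k (hp.symm.subset hk)

theorem core (L : List (List Int)) (hpair : L.Pairwise (fun a b => evE a ≤ evE b))
    (hnd : ¬ D_maxTwoEvents_op L) {p q : List (List Int)} {t : List Int}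
    (hsplit : L = p ++ t :: q) :
    fA p t ≤ maxRun fB [] L 0 := by
  have hB0 : (0 : Int) ≤ maxRun fB [] L 0 := maxRun_acc_le fB L [] 0
  have hBge : ∀ (q1 : List (List Int)) (u : List Int) (q2 : List (List Int)),
      L = q1 ++ u :: q2 → fB q1 u ≤ maxRun fB [] L 0 := by
    intro q1 u q2 hq
    simpa using maxRun_ge_term fB (q1 := q1) [] L q2 u hq 0
  -- a member below / at-or-after a split point
  have hsplitmem : ∀ (q1 : List (List Int)) (u : List Int) (q2 : List (List Int)),
      L = q1 ++ u :: q2 → ∀ l ∈ L, evE l < evE u → l ∈ q1 := by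
    intro q1 u q2 hq l hl hlt
    rw [hq] at hl
    rcases List.mem_append.1 hl with h | h
    · exact h
    · exfalso
      rcases List.mem_cons.1 h with h | h
      · subst h; omega
      · have hp2 := hpair
        rw [hq] at hp2
        have := ((List.pairwise_append.1 hp2).2.1)
        have := (List.pairwise_cons.1 this).1 l h
        omega
  unfold fA tVal
  by_cases hcond : -1 ≤ evS t - 1 ∨ 0 < pmW (evS t - 1) p
  · rw [if_pos hcond]
    exact hBge p t q hsplit
  · rw [if_neg hcond]
    push_neg at hcond
    obtain ⟨hs, hnp⟩ := hcond
    have hpm0 : pmW (evS t - 1) p = 0 := le_antisymm hnp (pmW_nonneg _ _)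
    have hrm0 := rmW_nonneg p
    by_cases hrm : rmW p ≤ 0
    · have h2 : evW t + pmW (evS t - 1) p ≤ maxRun fB [] L 0 := hBge p t q hsplit
      have h0 := pmW_nonneg (evS t - 1) p
      omega
    · push_neg at hrm
      obtain ⟨p1, j, p2, hpj, hwj⟩ := rmW_exists hrm
      have hjmem : j ∈ p := by rw [hpj]; simp
      have hjL : j ∈ L := by rw [hsplit]; exact List.mem_append_left _ hjmem
      have htL : t ∈ L := by rw [hsplit]; simp
      by_cases hwt : evW t ≤ 0
      · have hsplitj : L = p1 ++ j :: (p2 ++ t :: q) := by rw [hsplit, hpj]; simp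
        have h2 : evW j + pmW (evS j - 1) p1 ≤ maxRun fB [] L 0 :=
          hBge p1 j (p2 ++ t :: q) hsplitj
        have h0 := pmW_nonneg (evS j - 1) p1
        omega
      · push_neg at hwt
        -- the heavy case: a would pair t with the overlapping j; refute via ¬D
        by_contra hgt
        push_neg at hgt
        have hEj : evS t ≤ evE j := by
          by_contra hlt
          push_neg at hlt
          have := pmW_ge_mem hjmem (x := evS t - 1) (by omega)
          omega
        have hEt : evE j ≤ evE t := by
          have hp2 := hpair
          rw [hsplit] at hp2
          exact (List.pairwise_append.1 hp2).2.2 j hjmem t (List.mem_cons_self ..)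
        have hmemp : ∀ k ∈ L, evE k < evE t → k ∈ p := fun k hk hlt =>
          hsplitmem p t q hsplit k hk hlt
        have hc5 : ∀ k ∈ L, evE k < evE t → evW k ≤ evW j := by
          intro k hk hlt
          have := rmW_ge_mem (hmemp k hk hlt)
          omega
        have hc7 : ∀ k ∈ L, evW k < evW t + evW j := by
          intro k hk
          obtain ⟨q1, q2, hq⟩ := List.append_of_mem hk
          have h2 : evW k + pmW (evS k - 1) q1 ≤ maxRun fB [] L 0 := hBge q1 k q2 hq
          have h0 := pmW_nonneg (evS k - 1) q1
          omega
        have hcount : t = j → 2 ≤ L.count t := by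
          intro he
          rw [hsplit, List.count_append]
          have h1 : 1 ≤ p.count t := by
            rw [he]
            exact List.count_pos_iff.2 hjmem
          have h2 : (t :: q).count t = q.count t + 1 := List.count_cons_self
          omega
        have hs' : evS t < 0 := by omega
        have hwt' : 0 < evW t := hwt
        have hwj' : 0 < evW j := by omega
        exact hnd ⟨t, htL, j, hjL, hcount, hs', hwt', hwj', hEj, hEt,
          fun k hk => ⟨hc5 k hk, hc7 k hk⟩⟩

theorem main_eq (events : List (List Int)) (hnd : ¬ D_maxTwoEvents_op events) :
    maxTwoEvents_op events = maxTwoEvents_op_alt events := by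
  have hperm : (PySem.List.sorted events (fun x => x.getD 1 0)).Perm events :=
    PySem.List.sorted_perm events (fun x => x.getD 1 0) false
  have hndL : ¬ D_maxTwoEvents_op (PySem.List.sorted events (fun x => x.getD 1 0)) :=
    fun h => hnd (D_of_perm hperm h)
  have hpair : (PySem.List.sorted events (fun x => x.getD 1 0)).Pairwise
      (fun a b => evE a ≤ evE b) :=
    PySem.List.sorted_pairwise events (fun x => x.getD 1 0)
  have hinv0 : AInv [] [0] [-1] :=
    ⟨[], [], rfl, rfl, rfl, List.Pairwise.nil, by simp [rmW], fun x => by simp [pmW], by simp⟩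
  rw [portA_eq, portB_eq]
  rw [foldA_eq _ [] [0] [-1] 0 hinv0 (by simp) hpair]
  have hB : ((PySem.List.sorted events (fun x => x.getD 1 0)).foldl stepB (0, [])).1 =
      maxRun fB [] (PySem.List.sorted events (fun x => x.getD 1 0)) 0 :=
    foldB_eq _ [] 0
  rw [hB]
  apply le_antisymm
  · refine maxRun_le fA _ [] 0 _ ?_ ?_
    · intro q1 u q2 hq
      simpa using core _ hpair hndL hq
    · exact maxRun_acc_le fB _ [] 0
  · refine maxRun_le fB _ [] 0 _ ?_ ?_
    · intro q1 u q2 hq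
      have h1 : fB ([] ++ q1) u ≤ fA ([] ++ q1) u := by
        unfold fA fB tVal
        have := pmW_le_rmW (evS u - 1) ([] ++ q1)
        split_ifs <;> omega
      exact le_trans h1 (maxRun_ge_term fA (q1 := q1) [] _ q2 u hq 0)
    · exact maxRun_acc_le fA _ [] 0

-- ===== VERDICT (by name: the statement is the Claim_ definition above) =====
theorem maxTwoEvents_op_spec : Claim_unchanged_maxTwoEvents_op := by
  intro events _ _ hnd
  exact main_eq events hnd

theorem maxTwoEvents_op_changed : Claim_changed_maxTwoEvents_op := by
  unfold Claim_changed_maxTwoEvents_op; decide
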